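-- pv_equiv track=rewrite | github.com/johnnychou/reset_script | cli_factory.py | content_lines_to_dict
-- ===== SOURCE A (Python) =====
-- def content_lines_to_dict(content_lines):
--
--     result = []
--     resultEntry = {}
--
--     for content_line in content_lines:
--
--         if content_line.strip() == "":
--             result.append(resultEntry)
--             resultEntry = {}
--             continue
--
--         split_entry = content_line.strip().split(": ", 1)
--         resultEntry[split_entry[0]] = split_entry[1]
--
--     return result
-- ===== SOURCE B (Python) =====
-- def content_lines_to_dict(content_lines):
--     # Index-based: parse every line up front (None marks a blank line), locate the
--     # blank positions, then build one dict per slice between consecutive blank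
--     # positions (the trailing slice has no closing blank, so it never appears).
--     def pair(s):
--         k, v = s.split(": ", 1)
--         return (k, v)
--     stripped = [line.strip() for line in content_lines]
--     parsed = [pair(s) if s else None for s in stripped]
--     blanks = [i for i, p in enumerate(parsed) if p is None]
--     starts = [0] + [i + 1 for i in blanks]
--     return [dict(parsed[lo:hi]) for lo, hi in zip(starts, blanks)]
-- ===== Notes on version B (the rewrite author's own statement) =====
-- stated objective: alternative
-- what changed: Replaces A's fused accumulate-and-flush loop (building each dict while scanning, flushing it on every blank line) with an index-based plan: compute the blank-line positions with enumerate, pair consecutive boundaries with zip, and build one dict per slice between them; the trailing unterminated slice is never touched.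
import Mathlib
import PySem

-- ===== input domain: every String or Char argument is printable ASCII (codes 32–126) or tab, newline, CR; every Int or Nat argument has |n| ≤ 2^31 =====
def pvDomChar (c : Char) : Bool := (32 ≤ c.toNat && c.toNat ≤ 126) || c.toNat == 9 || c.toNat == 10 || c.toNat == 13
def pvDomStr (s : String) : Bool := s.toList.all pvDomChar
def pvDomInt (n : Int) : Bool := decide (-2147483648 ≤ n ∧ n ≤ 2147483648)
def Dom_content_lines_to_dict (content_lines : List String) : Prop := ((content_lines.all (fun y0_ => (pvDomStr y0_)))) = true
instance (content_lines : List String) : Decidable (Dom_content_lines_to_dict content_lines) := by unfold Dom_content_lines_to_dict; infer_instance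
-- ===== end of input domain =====

-- B locates the blank-line positions first and builds one dict per slice between
-- consecutive blank positions (index/slice driven, no accumulator), instead of A's
-- fused accumulate-and-flush loop; same return value on Pre_.

-- ===== PORT A =====
-- A's loop body: blank line flushes the current dict, otherwise split and assign.
def pvAStep (st : List (List (String × String)) × PySem.Dict String String) (content_line : String) :
    List (List (String × String)) × PySem.Dict String String :=
  if PySem.Str.strip content_line = "" then
    (st.1 ++ [st.2.items], PySem.Dict.empty)
  else
    let split_entry := (PySem.Str.splitMax? (PySem.Str.strip content_line) ": " 1).getD []
    (st.1, st.2.insert ((PySem.List.pyGet? split_entry 0).getD "") ((PySem.List.pyGet? split_entry 1).getD ""))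

def content_lines_to_dict (content_lines : List String) : List (List (String × String)) :=
  (content_lines.foldl pvAStep ([], PySem.Dict.empty)).1

-- ===== PORT B =====
-- pair(s): s.split(": ", 1) of an already-stripped non-blank line, as the (key, value) pair
def pvParsePair (s : String) : String × String :=
  let parts := (PySem.Str.splitMax? s ": " 1).getD []
  ((PySem.List.pyGet? parts 0).getD "", (PySem.List.pyGet? parts 1).getD "")

-- dict(xs): the none branch is unreachable in B (slices between consecutive blank
-- positions contain no None); Python would raise TypeError there.
def pvOStep (d : PySem.Dict String String) (op : Option (String × String)) :
    PySem.Dict String String :=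
  match op with
  | some p => d.insert p.1 p.2
  | none => d

def pvSliceDict (xs : List (Option (String × String))) : List (String × String) :=
  (xs.foldl pvOStep PySem.Dict.empty).items

def content_lines_to_dict_alt (content_lines : List String) : List (List (String × String)) :=
  let stripped := content_lines.map PySem.Str.strip
  let parsed := stripped.map (fun s => if s = "" then none else some (pvParsePair s))
  let blanks := ((PySem.List.enumerate parsed 0).filter (fun p => p.2.isNone)).map (·.1)
  let starts := (0 : Int) :: blanks.map (· + 1)
  (starts.zip blanks).map (fun p => pvSliceDict (PySem.List.slice parsed (some p.1) (some p.2)))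

-- ===== PRECONDITION & SPEC =====
-- Pre_ excludes exactly the inputs on which the Python A raises IndexError: a
-- non-blank line whose stripped form does not contain ": " has no second component.
def Pre_content_lines_to_dict (content_lines : List String) : Prop :=
  ∀ line ∈ content_lines, PySem.Str.strip line ≠ "" →
    PySem.Str.isIn ": " (PySem.Str.strip line) = true
instance (content_lines : List String) : Decidable (Pre_content_lines_to_dict content_lines) := by
  unfold Pre_content_lines_to_dict; infer_instance

def pvWitness_content_lines_to_dict : List String := ["name: box", "size: 3", "", "name: cup", ""]

def Spec_content_lines_to_dict (content_lines : List String) (out : List (List (String × String))) : Prop := out = content_lines_to_dict_alt content_lines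
instance (content_lines : List String) (out : List (List (String × String))) : Decidable (Spec_content_lines_to_dict content_lines out) := by unfold Spec_content_lines_to_dict; infer_instance

-- ===== CLAIM (what is proved, stated in full; the proofs are below) =====
def Claim_equal_content_lines_to_dict : Prop := ∀ (content_lines : List String), Dom_content_lines_to_dict content_lines → Pre_content_lines_to_dict content_lines → Spec_content_lines_to_dict content_lines (content_lines_to_dict content_lines)

-- ===== LEMMAS AND PROOFS =====

-- the non-blank line l, stripped and parsed (none marks a blank line)
def pvParseLine (l : String) : Option (String × String) :=
  if PySem.Str.strip l = "" then none else some (pvParsePair (PySem.Str.strip l))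

-- the blank positions of the parsed list, as naturals
def pvBlanksN : List (Option (String × String)) → List Nat
  | [] => []
  | x :: xs => if x = none then 0 :: (pvBlanksN xs).map (· + 1) else (pvBlanksN xs).map (· + 1)

-- Nat form of B's group computation
def pvGroupsN (xs : List (Option (String × String))) : List (List (Option (String × String))) :=
  ((0 :: (pvBlanksN xs).map (· + 1)).zip (pvBlanksN xs)).map
    (fun p => (xs.drop p.1).take (p.2 - p.1))

-- recursive splitter: split at blanks, drop the trailing unterminated group
def pvSplitS : List (Option (String × String)) → List (List (Option (String × String)))
  | [] => []
  | x :: xs =>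
    if x = none then [] :: pvSplitS xs
    else match pvSplitS xs with
         | [] => []
         | g :: gs => (x :: g) :: gs

-- A's loop as a recursion threading the pending dict
def pvSplitD (d : PySem.Dict String String) : List String → List (List (String × String))
  | [] => []
  | l :: ls =>
    if PySem.Str.strip l = "" then d.items :: pvSplitD PySem.Dict.empty ls
    else pvSplitD (d.insert (pvParsePair (PySem.Str.strip l)).1 (pvParsePair (PySem.Str.strip l)).2) ls

theorem pv_A_eq_splitD (lines : List String) (acc : List (List (String × String)))
    (d : PySem.Dict String String) :
    (lines.foldl pvAStep (acc, d)).1 = acc ++ pvSplitD d lines := by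
  induction lines generalizing acc d with
  | nil => simp [pvSplitD]
  | cons l ls ih =>
    by_cases h : PySem.Str.strip l = ""
    · simp only [List.foldl_cons, pvAStep, if_pos h, pvSplitD, ih]
      simp
    · have ha : pvAStep (acc, d) l
          = (acc, d.insert (pvParsePair (PySem.Str.strip l)).1 (pvParsePair (PySem.Str.strip l)).2) := by
        simp only [pvAStep, if_neg h, pvParsePair]
      rw [List.foldl_cons, ha, ih]
      simp only [pvSplitD, if_neg h]

theorem pv_blanks_enumerate (xs : List (Option (String × String))) (s : Int) :
    ((PySem.List.enumerate xs s).filter (fun p => p.2.isNone)).map (·.1)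
      = (pvBlanksN xs).map (fun n : Nat => s + (n : Int)) := by
  induction xs generalizing s with
  | nil => simp [pvBlanksN]
  | cons x xs ih =>
    rw [PySem.List.enumerate_cons]
    by_cases h : x = none
    · subst h
      simp only [List.filter_cons, pvBlanksN, Option.isNone_none, if_true,
        List.map_cons, ih, List.map_map]
      congr 1
      · simp
      refine List.map_congr_left (fun n _ => ?_)
      simp only [Function.comp_apply]; push_cast; ring
    · simp only [List.filter_cons, pvBlanksN, if_neg h]
      have hbe : x.isNone = false := by
        cases x with
        | none => exact absurd rfl h
        | some _ => rfl
      simp only [hbe, Bool.false_eq_true, if_false, ih, List.map_map]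
      refine List.map_congr_left (fun n _ => ?_)
      simp only [Function.comp_apply]
      push_cast; ring

theorem pv_splitS_nil_iff (xs : List (Option (String × String))) :
    pvSplitS xs = [] ↔ pvBlanksN xs = [] := by
  induction xs with
  | nil => simp [pvSplitS, pvBlanksN]
  | cons x xs ih =>
    by_cases h : x = none <;> simp [pvSplitS, pvBlanksN, h]
    cases hx : pvSplitS xs <;> simp_all

theorem pv_shift {α : Type} (ps : List (Nat × Nat)) (x : α) (xs : List α) :
    (ps.map (Prod.map (· + 1) (· + 1))).map
        (fun p : Nat × Nat => ((x :: xs).drop p.1).take (p.2 - p.1))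
      = ps.map (fun p : Nat × Nat => (xs.drop p.1).take (p.2 - p.1)) := by
  rw [List.map_map]
  refine List.map_congr_left (fun p _ => ?_)
  cases p with | mk a b => simp [Prod.map, Nat.add_sub_add_right]

theorem pv_groupsN_eq_splitS (xs : List (Option (String × String))) :
    pvGroupsN xs = pvSplitS xs := by
  induction xs with
  | nil => rfl
  | cons x xs ih =>
    by_cases h : x = none
    · subst h
      have hb : pvBlanksN (none :: xs) = 0 :: (pvBlanksN xs).map (· + 1) := by
        simp [pvBlanksN]
      have key : (0 :: (pvBlanksN ((none : Option (String × String)) :: xs)).map (· + 1)).zip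
            (pvBlanksN ((none : Option (String × String)) :: xs))
          = (0, 0) :: ((0 :: (pvBlanksN xs).map (· + 1)).zip (pvBlanksN xs)).map
              (Prod.map (· + 1) (· + 1)) := by
        rw [hb, ← List.zip_map, List.map_cons, List.zip_cons_cons]
      have hG : pvGroupsN ((none : Option (String × String)) :: xs) = [] :: pvGroupsN xs := by
        conv_lhs => unfold pvGroupsN
        rw [key, List.map_cons, pv_shift]
        conv_rhs => unfold pvGroupsN
        simp
      rw [hG, ih]
      simp [pvSplitS]
    · cases hbs : pvBlanksN xs with
      | nil =>
        have h1 : pvBlanksN (x :: xs) = [] := by simp [pvBlanksN, h, hbs]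
        have h2 : pvSplitS xs = [] := (pv_splitS_nil_iff xs).mpr hbs
        unfold pvGroupsN
        rw [h1]
        simp [pvSplitS, h, h2]
      | cons b r =>
        have hb : pvBlanksN (x :: xs) = (b + 1) :: r.map (· + 1) := by
          simp [pvBlanksN, h, hbs]
        have key : (0 :: (pvBlanksN (x :: xs)).map (· + 1)).zip (pvBlanksN (x :: xs))
            = (0, b + 1) :: (((b + 1) :: r.map (· + 1)).zip r).map
                (Prod.map (· + 1) (· + 1)) := by
          rw [hb, ← List.zip_map, List.map_cons, List.zip_cons_cons]
        have hgx : pvGroupsN xs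
            = xs.take b :: (((b + 1) :: r.map (· + 1)).zip r).map
                (fun p : Nat × Nat => (xs.drop p.1).take (p.2 - p.1)) := by
          unfold pvGroupsN
          rw [hbs, List.map_cons, List.zip_cons_cons, List.map_cons]
          simp
        have hsx : pvSplitS xs
            = xs.take b :: (((b + 1) :: r.map (· + 1)).zip r).map
                (fun p : Nat × Nat => (xs.drop p.1).take (p.2 - p.1)) := by
          rw [← ih, hgx]
        have hG : pvGroupsN (x :: xs)
            = (x :: xs.take b) :: (((b + 1) :: r.map (· + 1)).zip r).map
                (fun p : Nat × Nat => (xs.drop p.1).take (p.2 - p.1)) := by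
          conv_lhs => unfold pvGroupsN
          rw [key, List.map_cons, pv_shift]
          simp [List.take_succ_cons]
        rw [hG]
        simp [pvSplitS, h, hsx]

theorem pv_splitD_eq (lines : List String) (d : PySem.Dict String String) :
    pvSplitD d lines
      = match pvSplitS (lines.map pvParseLine) with
        | [] => []
        | g :: gs => (g.foldl pvOStep d).items :: gs.map pvSliceDict := by
  induction lines generalizing d with
  | nil => simp [pvSplitD, pvSplitS]
  | cons l ls ih =>
    by_cases h : PySem.Str.strip l = "" <;>
      cases hsp : pvSplitS (ls.map pvParseLine) <;>
        simp [pvSplitD, pvSplitS, pvParseLine, h, ih, hsp, pvSliceDict, pvOStep, List.foldl_cons]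

theorem pv_parsed_eq (lines : List String) :
    (lines.map PySem.Str.strip).map
        (fun s => if s = "" then (none : Option (String × String)) else some (pvParsePair s))
      = lines.map pvParseLine := by
  rw [List.map_map]
  rfl

theorem pv_alt_eq (lines : List String) :
    content_lines_to_dict_alt lines = (pvGroupsN (lines.map pvParseLine)).map pvSliceDict := by
  have halt : content_lines_to_dict_alt lines
      = List.map (fun p => pvSliceDict (PySem.List.slice (lines.map pvParseLine) (some p.1) (some p.2)))
          (((0 : Int) :: (((PySem.List.enumerate (lines.map pvParseLine) 0).filter
              (fun p => p.2.isNone)).map (·.1)).map (· + 1)).zip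
            (((PySem.List.enumerate (lines.map pvParseLine) 0).filter
              (fun p => p.2.isNone)).map (·.1))) := by
    have h0 : content_lines_to_dict_alt lines
        = List.map (fun p => pvSliceDict (PySem.List.slice
              ((lines.map PySem.Str.strip).map
                (fun s => if s = "" then (none : Option (String × String)) else some (pvParsePair s)))
              (some p.1) (some p.2)))
            (((0 : Int) :: (((PySem.List.enumerate ((lines.map PySem.Str.strip).map
                (fun s => if s = "" then (none : Option (String × String)) else some (pvParsePair s))) 0).filter
                (fun p => p.2.isNone)).map (·.1)).map (· + 1)).zip
              (((PySem.List.enumerate ((lines.map PySem.Str.strip).map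
                (fun s => if s = "" then (none : Option (String × String)) else some (pvParsePair s))) 0).filter
                (fun p => p.2.isNone)).map (·.1))) := rfl
    rw [pv_parsed_eq] at h0
    exact h0
  rw [halt]
  unfold pvGroupsN
  rw [pv_blanks_enumerate]
  have h1 : (pvBlanksN (lines.map pvParseLine)).map (fun n : Nat => (0 : Int) + (n : Int))
      = (pvBlanksN (lines.map pvParseLine)).map (fun n : Nat => (n : Int)) := by
    simp
  rw [h1]
  have h2 : ((0 : Int) :: ((pvBlanksN (lines.map pvParseLine)).map (fun n : Nat => (n : Int))).map (· + 1))
      = (0 :: (pvBlanksN (lines.map pvParseLine)).map (· + 1)).map (fun n : Nat => (n : Int)) := by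
    rw [List.map_map, List.map_cons, List.map_map]
    simp only [Nat.cast_zero, List.cons.injEq, true_and]
    refine List.map_congr_left (fun n _ => ?_)
    simp [Function.comp_apply]
  rw [h2, List.zip_map, List.map_map, List.map_map]
  refine List.map_congr_left (fun p _ => ?_)
  simp only [Function.comp_apply, Prod.map]
  rw [PySem.List.slice_natCast]

-- ===== VERDICT (by name: the statement is the Claim_ definition above) =====
theorem content_lines_to_dict_spec : Claim_equal_content_lines_to_dict := by
  intro lines _ _
  unfold Spec_content_lines_to_dict content_lines_to_dict
  rw [pv_alt_eq, pv_groupsN_eq_splitS, pv_A_eq_splitD, pv_splitD_eq, List.nil_append]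
  cases pvSplitS (lines.map pvParseLine) <;> simp [pvSliceDict]
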